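-- pv_equiv track=rewrite | github.com/harsha-gizmo/Fire-Extinguisher-Bot | project1_HH_SJ.py | is_success_possible
-- ===== SOURCE A (Python) =====
-- from collections import deque
--
-- GRID_SIZE = 40
--
-- def is_success_possible(grid, start, goal, fire_start):
--     queue = deque([start])
--     visited = set([start])
--     while queue:
--         current = queue.popleft()
--         if current == goal:
--             return True
--         for nr, nc in [(current[0]-1, current[1]), (current[0]+1, current[1]), (current[0], current[1]-1), (current[0], current[1]+1)]:
--             if (0 <= nr < GRID_SIZE and 0 <= nc < GRID_SIZE and
--                 grid[nr][nc] == 'open' and (nr, nc) not in visited and (nr, nc) != fire_start):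
--                 visited.add((nr, nc))
--                 queue.append((nr, nc))
--     return False
-- ===== SOURCE B (Python) =====
-- GRID_SIZE = 40
--
-- def is_success_possible(grid, start, goal, fire_start):
--     # Round-synchronous region growing: saturate the set of valid cells
--     # reachable from start, then answer with one membership test.
--     if goal == start:
--         return True
--
--     def valid(cell):
--         r, c = cell
--         return (0 <= r < GRID_SIZE and 0 <= c < GRID_SIZE
--                 and grid[r][c] == 'open' and cell != fire_start)
--
--     region = {start}
--     frontier = {start}
--     for _ in range(GRID_SIZE * GRID_SIZE):
--         frontier = {n for (r, c) in frontier
--                       for n in ((r - 1, c), (r + 1, c), (r, c - 1), (r, c + 1))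
--                       if n not in region and valid(n)}
--         region |= frontier
--     return goal in region
-- ===== Notes on version B (the rewrite author's own statement) =====
-- stated objective: alternative
-- what changed: A's cell-at-a-time BFS (deque + visited set, early return on pop) is replaced by round-synchronous region growing: a set comprehension expands the whole frontier each round until the reachable region is saturated, and the answer is a single membership test at the end.
import Mathlib
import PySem

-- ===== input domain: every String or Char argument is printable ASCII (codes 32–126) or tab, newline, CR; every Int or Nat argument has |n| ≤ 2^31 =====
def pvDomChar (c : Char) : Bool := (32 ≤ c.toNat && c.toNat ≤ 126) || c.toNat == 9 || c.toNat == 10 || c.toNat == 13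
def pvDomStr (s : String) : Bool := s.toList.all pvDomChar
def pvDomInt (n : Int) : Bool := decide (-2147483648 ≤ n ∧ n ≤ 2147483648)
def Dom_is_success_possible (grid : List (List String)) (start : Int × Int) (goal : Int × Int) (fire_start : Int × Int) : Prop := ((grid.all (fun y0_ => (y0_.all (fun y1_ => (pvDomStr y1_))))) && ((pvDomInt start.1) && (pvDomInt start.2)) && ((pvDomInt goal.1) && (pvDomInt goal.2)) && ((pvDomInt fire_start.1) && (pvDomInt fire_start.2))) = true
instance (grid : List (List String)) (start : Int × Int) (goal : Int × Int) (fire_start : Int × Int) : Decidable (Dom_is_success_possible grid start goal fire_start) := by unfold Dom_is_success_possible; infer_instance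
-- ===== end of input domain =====

-- B replaces A's single-cell BFS queue by round-synchronous region growing (grow a set of
-- reachable cells by whole frontier rounds, then answer with one membership test); objective:
-- alternative (a different decomposition of the same search, same asymptotic cost).

-- ===== PORT A =====
-- loop body of A's inner 'for nr, nc in [...]' (condition in Python's order; pyGet? = grid[nr][nc], none = IndexError, treated as a failed comparison — Python raises there, excluded by Pre_)
def pvPushA (grid : List (List String)) (fire_start : Int × Int)
    (st : List (Int × Int) × PySem.Set (Int × Int)) (n : Int × Int) :
    List (Int × Int) × PySem.Set (Int × Int) :=
  if 0 ≤ n.1 ∧ n.1 < 40 ∧ 0 ≤ n.2 ∧ n.2 < 40 ∧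
     ((PySem.List.pyGet? grid n.1).bind (fun row => PySem.List.pyGet? row n.2)) = some "open" ∧
     ¬ PySem.Set.contains st.2 n = true ∧ n ≠ fire_start
  then (st.1 ++ [n], PySem.Set.add st.2 n) else st

-- A's 'while queue' loop; fuel 4000 is a termination guard only (never exhausted: each
-- iteration pops one queue entry and every cell is enqueued at most once)
def pvBfsA (grid : List (List String)) (goal : Int × Int) (fire_start : Int × Int) :
    Nat → List (Int × Int) → PySem.Set (Int × Int) → Bool
  | 0, _, _ => false
  | fuel + 1, queue, visited =>
    match queue with
    | [] => false
    | current :: rest =>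
      if current = goal then true
      else
        let st := [(current.1 - 1, current.2), (current.1 + 1, current.2),
                   (current.1, current.2 - 1), (current.1, current.2 + 1)].foldl
                  (pvPushA grid fire_start) (rest, visited)
        pvBfsA grid goal fire_start fuel st.1 st.2

def is_success_possible (grid : List (List String)) (start : Int × Int) (goal : Int × Int) (fire_start : Int × Int) : Bool :=
  pvBfsA grid goal fire_start 4000 [start] (PySem.Set.ofList [start])

-- ===== PORT B =====
-- the 4-neighbour tuple of B
def pvNbrsB (c : Int × Int) : List (Int × Int) :=
  [(c.1 - 1, c.2), (c.1 + 1, c.2), (c.1, c.2 - 1), (c.1, c.2 + 1)]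

-- B's local 'valid(cell)' (pyGet? none = IndexError, treated as a failed comparison — Python raises there, excluded by Pre_)
def pvValidB (grid : List (List String)) (fire_start : Int × Int) (n : Int × Int) : Bool :=
  decide (0 ≤ n.1 ∧ n.1 < 40 ∧ 0 ≤ n.2 ∧ n.2 < 40 ∧
    ((PySem.List.pyGet? grid n.1).bind (fun row => PySem.List.pyGet? row n.2)) = some "open" ∧
    n ≠ fire_start)

-- one round of B's loop: new frontier = set comprehension over the old frontier, region |= frontier
def pvStepB (grid : List (List String)) (fire_start : Int × Int)
    (RF : PySem.Set (Int × Int) × PySem.Set (Int × Int)) :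
    PySem.Set (Int × Int) × PySem.Set (Int × Int) :=
  let F' := RF.2.foldl (fun F c => (pvNbrsB c).foldl
      (fun F n => if ¬ PySem.Set.contains RF.1 n = true ∧ pvValidB grid fire_start n = true
                  then PySem.Set.add F n else F) F)
    PySem.Set.empty
  (PySem.Set.union RF.1 F', F')

def is_success_possible_alt (grid : List (List String)) (start : Int × Int) (goal : Int × Int) (fire_start : Int × Int) : Bool :=
  if goal = start then true
  else
    let RF := (List.range (40 * 40)).foldl (fun RF _ => pvStepB grid fire_start RF)
      (PySem.Set.ofList [start], PySem.Set.ofList [start])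
    PySem.Set.contains RF.1 goal

-- ===== PRECONDITION & SPEC =====
-- Pre_ excludes inputs on which A's BFS can index past the end of the grid and raise IndexError
-- (grid[nr][nc] is only guarded by 0 ≤ nr,nc < 40, not by the grid's real shape). It admits every
-- input whose grid covers the whole fixed 40×40 board, plus the shapes that return without unsafe
-- indexing (goal == start; no neighbour of start on the board; every on-board neighbour of start
-- present in the grid and non-'open', so the BFS stops after one round). This is still narrower than
-- the exact no-crash set: on some smaller grids A happens to stay inside while expanding (claim cites).
def Pre_is_success_possible (grid : List (List String)) (start : Int × Int) (goal : Int × Int) (fire_start : Int × Int) : Prop :=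
  (40 ≤ grid.length ∧ ∀ row ∈ grid.take 40, 40 ≤ row.length) ∨
  goal = start ∨
  (∀ n ∈ [(start.1 - 1, start.2), (start.1 + 1, start.2), (start.1, start.2 - 1), (start.1, start.2 + 1)],
     ¬ (0 ≤ n.1 ∧ n.1 < 40 ∧ 0 ≤ n.2 ∧ n.2 < 40)) ∨
  (∀ n ∈ [(start.1 - 1, start.2), (start.1 + 1, start.2), (start.1, start.2 - 1), (start.1, start.2 + 1)],
     (0 ≤ n.1 ∧ n.1 < 40 ∧ 0 ≤ n.2 ∧ n.2 < 40) →
     ((PySem.List.pyGet? grid n.1).bind (fun row => PySem.List.pyGet? row n.2)) ≠ none ∧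
     ((PySem.List.pyGet? grid n.1).bind (fun row => PySem.List.pyGet? row n.2)) ≠ some "open")
instance (grid : List (List String)) (start : Int × Int) (goal : Int × Int) (fire_start : Int × Int) : Decidable (Pre_is_success_possible grid start goal fire_start) := by unfold Pre_is_success_possible; infer_instance

def pvWitness_is_success_possible : List (List String) × (Int × Int) × (Int × Int) × (Int × Int) :=
  ([], (50, 50), (0, 0), (1, 1))

def Spec_is_success_possible (grid : List (List String)) (start : Int × Int) (goal : Int × Int) (fire_start : Int × Int) (out : Bool) : Prop := out = is_success_possible_alt grid start goal fire_start
instance (grid : List (List String)) (start : Int × Int) (goal : Int × Int) (fire_start : Int × Int) (out : Bool) : Decidable (Spec_is_success_possible grid start goal fire_start out) := by unfold Spec_is_success_possible; infer_instance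

-- ===== CLAIM (what is proved, stated in full; the proofs are below) =====
def Claim_equal_is_success_possible : Prop := ∀ (grid : List (List String)) (start : Int × Int) (goal : Int × Int) (fire_start : Int × Int), Dom_is_success_possible grid start goal fire_start → Pre_is_success_possible grid start goal fire_start → Spec_is_success_possible grid start goal fire_start (is_success_possible grid start goal fire_start)

-- ===== LEMMAS AND PROOFS =====
-- The Lean ports are total (an out-of-grid index reads as a failed comparison), and the
-- equivalence below is in fact proved for every input; Pre_ marks where Python A itself returns.

-- the fixed 40×40 board as a finset
noncomputable def pvBoard : Finset (Int × Int) := Finset.Icc (0 : Int) 39 ×ˢ Finset.Icc (0 : Int) 39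

-- cells reachable from c by steps into valid cells (common spec of both searches)
inductive pvFrom (grid : List (List String)) (fire_start : Int × Int) : (Int × Int) → (Int × Int) → Prop
  | refl (c : Int × Int) : pvFrom grid fire_start c c
  | step {c d n : Int × Int} : pvFrom grid fire_start c d → n ∈ pvNbrsB d →
      pvValidB grid fire_start n = true → pvFrom grid fire_start c n

theorem pvFrom_trans {grid : List (List String)} {fire_start a b c : Int × Int}
    (h1 : pvFrom grid fire_start a b) (h2 : pvFrom grid fire_start b c) :
    pvFrom grid fire_start a c := by
  induction h2 with
  | refl => exact h1
  | step h hm hv ih => exact pvFrom.step ih hm hv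

theorem pvValid_mem_board {grid : List (List String)} {fire_start n : Int × Int}
    (h : pvValidB grid fire_start n = true) : n ∈ pvBoard := by
  simp only [pvValidB, decide_eq_true_eq] at h
  simp only [pvBoard, Finset.mem_product, Finset.mem_Icc]
  omega

theorem pvBoard_card : pvBoard.card = 1600 := by
  simp [pvBoard, Int.card_Icc]

theorem pvLen_le {s0 : Int × Int} {v : List (Int × Int)} (hnd : v.Nodup)
    (hsub : ∀ c ∈ v, c = s0 ∨ c ∈ pvBoard) : v.length ≤ 1601 := by
  have h1 : v.toFinset ⊆ insert s0 pvBoard := by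
    intro x hx
    rcases hsub x (List.mem_toFinset.mp hx) with h | h
    · exact Finset.mem_insert.mpr (Or.inl h)
    · exact Finset.mem_insert.mpr (Or.inr h)
  have h2 := Finset.card_le_card h1
  have h3 : v.toFinset.card = v.length := List.toFinset_card_of_nodup hnd
  have h4 : (insert s0 pvBoard).card ≤ 1601 := by
    have := Finset.card_insert_le s0 pvBoard
    rw [pvBoard_card] at this
    omega
  omega

theorem pvAdd_eq {v : PySem.Set (Int × Int)} {n : Int × Int} (h : ¬ n ∈ v) :
    PySem.Set.add v n = v ++ [n] := by
  unfold PySem.Set.add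
  rw [if_neg]
  intro hc
  exact h ((PySem.Set.contains_iff v n).mp hc)

theorem pvCondA_iff (grid : List (List String)) (fire_start : Int × Int)
    (v : PySem.Set (Int × Int)) (n : Int × Int) :
    (0 ≤ n.1 ∧ n.1 < 40 ∧ 0 ≤ n.2 ∧ n.2 < 40 ∧
      ((PySem.List.pyGet? grid n.1).bind (fun row => PySem.List.pyGet? row n.2)) = some "open" ∧
      ¬ PySem.Set.contains v n = true ∧ n ≠ fire_start)
    ↔ (pvValidB grid fire_start n = true ∧ ¬ n ∈ v) := by
  simp only [pvValidB, decide_eq_true_eq, PySem.Set.contains_iff]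
  tauto

theorem pvFoldA_spec (grid : List (List String)) (fire_start : Int × Int) :
    ∀ (ns : List (Int × Int)) (q : List (Int × Int)) (v : PySem.Set (Int × Int)), v.Nodup →
    ∃ new : List (Int × Int),
      ns.foldl (pvPushA grid fire_start) (q, v) = (q ++ new, v ++ new) ∧
      new.Nodup ∧
      (∀ x ∈ new, ¬ x ∈ v ∧ x ∈ ns ∧ pvValidB grid fire_start x = true) ∧
      (∀ x ∈ ns, pvValidB grid fire_start x = true → x ∈ v ∨ x ∈ new) := by
  intro ns
  induction ns with
  | nil =>
    intro q v hv
    exact ⟨[], by simp, List.nodup_nil, by simp, by simp⟩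
  | cons n ns ih =>
    intro q v hv
    by_cases h : pvValidB grid fire_start n = true ∧ ¬ n ∈ v
    · have hstep : pvPushA grid fire_start (q, v) n = (q ++ [n], v ++ [n]) := by
        unfold pvPushA
        rw [if_pos ((pvCondA_iff grid fire_start v n).mpr h)]
        rw [pvAdd_eq h.2]
      have hvnd : (v ++ [n]).Nodup := by
        rw [List.nodup_append]
        refine ⟨hv, List.nodup_singleton n, ?_⟩
        intro a ha b hb
        rw [List.mem_singleton] at hb
        subst hb
        intro hab
        exact h.2 (hab ▸ ha)
      obtain ⟨new', hfold, hnd', hprop', hcov'⟩ := ih (q ++ [n]) (v ++ [n]) hvnd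
      refine ⟨n :: new', ?_, ?_, ?_, ?_⟩
      · rw [List.foldl_cons, hstep, hfold]
        simp
      · refine List.nodup_cons.mpr ⟨?_, hnd'⟩
        intro hmem
        exact (hprop' n hmem).1 (by simp)
      · intro x hx
        rcases List.mem_cons.mp hx with rfl | hx
        · exact ⟨h.2, by simp, h.1⟩
        · obtain ⟨hnv, hns, hval⟩ := hprop' x hx
          refine ⟨fun hxv => hnv (by simp [hxv]), by simp [hns], hval⟩
      · intro x hx hval
        rcases List.mem_cons.mp hx with rfl | hx
        · exact Or.inr (by simp)
        · rcases hcov' x hx hval with hxv | hxn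
          · rcases List.mem_append.mp hxv with h1 | h1
            · exact Or.inl h1
            · rw [List.mem_singleton] at h1
              exact Or.inr (by simp [h1])
          · exact Or.inr (by simp [hxn])
    · have hstep : pvPushA grid fire_start (q, v) n = (q, v) := by
        unfold pvPushA
        rw [if_neg]
        intro hc
        exact h ((pvCondA_iff grid fire_start v n).mp hc)
      obtain ⟨new', hfold, hnd', hprop', hcov'⟩ := ih q v hv
      refine ⟨new', ?_, hnd', ?_, ?_⟩
      · rw [List.foldl_cons, hstep]
        exact hfold
      · intro x hx
        obtain ⟨a, b, c⟩ := hprop' x hx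
        exact ⟨a, by simp [b], c⟩
      · intro x hx hval
        rcases List.mem_cons.mp hx with rfl | hx
        · left
          by_contra hxv
          exact h ⟨hval, hxv⟩
        · exact hcov' x hx hval

theorem pvFrom_escape {grid : List (List String)} {fire_start goal : Int × Int}
    {q' v' : List (Int × Int)}
    (hcl : ∀ c ∈ v', ¬ c ∈ q' → c ≠ goal ∧
      ∀ n ∈ pvNbrsB c, pvValidB grid fire_start n = true → n ∈ v')
    {c0 x : Int × Int} (h : pvFrom grid fire_start c0 x) (hc0 : c0 ∈ v') :
    (∃ c ∈ q', pvFrom grid fire_start c x) ∨ (x ∈ v' ∧ ¬ x ∈ q') := by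
  induction h with
  | refl =>
    by_cases hq : c0 ∈ q'
    · exact Or.inl ⟨c0, hq, pvFrom.refl c0⟩
    · exact Or.inr ⟨hc0, hq⟩
  | @step dd nn h1 hm hval ih =>
    rcases ih with ⟨c, hcq, hf⟩ | ⟨hdv, hdq⟩
    · exact Or.inl ⟨c, hcq, pvFrom.step hf hm hval⟩
    · have hnv : nn ∈ v' := (hcl dd hdv hdq).2 nn hm hval
      by_cases hq : nn ∈ q'
      · exact Or.inl ⟨nn, hq, pvFrom.refl nn⟩
      · exact Or.inr ⟨hnv, hq⟩

theorem pvBfsA_iff (grid : List (List String)) (fire_start goal s0 : Int × Int) :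
    ∀ (fuel : Nat) (q : List (Int × Int)) (v : PySem.Set (Int × Int)),
    (∀ c ∈ q, c ∈ v) → q.Nodup → v.Nodup →
    (∀ c ∈ v, c = s0 ∨ c ∈ pvBoard) →
    (∀ c ∈ v, ¬ c ∈ q → c ≠ goal ∧
      ∀ n ∈ pvNbrsB c, pvValidB grid fire_start n = true → n ∈ v) →
    q.length + 2 * 1601 ≤ fuel + 2 * v.length →
    (pvBfsA grid goal fire_start fuel q v = true ↔ ∃ c ∈ q, pvFrom grid fire_start c goal) := by
  intro fuel
  induction fuel with
  | zero =>
    intro q v hqv hqnd hvnd hsub hcl hfuel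
    have hlen := pvLen_le hvnd hsub
    have hq0 : q = [] := by
      have : q.length = 0 := by omega
      exact List.eq_nil_of_length_eq_zero this
    subst hq0
    simp [pvBfsA]
  | succ fuel ih =>
    intro q v hqv hqnd hvnd hsub hcl hfuel
    cases q with
    | nil => simp [pvBfsA]
    | cons current rest =>
      by_cases hg : current = goal
      · refine iff_of_true (by simp [pvBfsA, hg]) ⟨current, by simp, ?_⟩
        rw [← hg]
        exact pvFrom.refl current
      · obtain ⟨new, hfold, hnd, hprop, hcov⟩ := pvFoldA_spec grid fire_start
          [(current.1 - 1, current.2), (current.1 + 1, current.2),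
           (current.1, current.2 - 1), (current.1, current.2 + 1)] rest v hvnd
        have hunf : pvBfsA grid goal fire_start (fuel + 1) (current :: rest) v
            = pvBfsA grid goal fire_start fuel (rest ++ new) (v ++ new) := by
          simp only [pvBfsA]
          rw [if_neg hg, hfold]
        have hqv' : ∀ c ∈ rest ++ new, c ∈ v ++ new := by
          intro c hc
          rcases List.mem_append.mp hc with h1 | h1
          · exact List.mem_append.mpr (Or.inl (hqv c (List.mem_cons_of_mem _ h1)))
          · exact List.mem_append.mpr (Or.inr h1)
        have hrestnd := (List.nodup_cons.mp hqnd).2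
        have hcurrest := (List.nodup_cons.mp hqnd).1
        have hqnd' : (rest ++ new).Nodup := by
          rw [List.nodup_append]
          refine ⟨hrestnd, hnd, ?_⟩
          intro a ha b hb hab
          exact (hprop b hb).1 (hab ▸ hqv a (List.mem_cons_of_mem _ ha))
        have hvnd' : (v ++ new).Nodup := by
          rw [List.nodup_append]
          refine ⟨hvnd, hnd, ?_⟩
          intro a ha b hb hab
          exact (hprop b hb).1 (hab ▸ ha)
        have hsub' : ∀ c ∈ v ++ new, c = s0 ∨ c ∈ pvBoard := by
          intro c hc
          rcases List.mem_append.mp hc with h1 | h1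
          · exact hsub c h1
          · exact Or.inr (pvValid_mem_board (hprop c h1).2.2)
        have hcl' : ∀ c ∈ v ++ new, ¬ c ∈ rest ++ new → c ≠ goal ∧
            ∀ n ∈ pvNbrsB c, pvValidB grid fire_start n = true → n ∈ v ++ new := by
          intro c hc hcq
          rcases List.mem_append.mp hc with hcv | hcn
          · by_cases hcc : c = current
            · subst hcc
              refine ⟨hg, ?_⟩
              intro n hn hval
              rcases hcov n (by simpa [pvNbrsB] using hn) hval with h1 | h1
              · exact List.mem_append.mpr (Or.inl h1)
              · exact List.mem_append.mpr (Or.inr h1)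
            · have hcq2 : ¬ c ∈ (current :: rest) := by
                intro hmem
                rcases List.mem_cons.mp hmem with h1 | h1
                · exact hcc h1
                · exact hcq (List.mem_append.mpr (Or.inl h1))
              obtain ⟨h1, h2⟩ := hcl c hcv hcq2
              exact ⟨h1, fun n hn hval => List.mem_append.mpr (Or.inl (h2 n hn hval))⟩
          · exact absurd (List.mem_append.mpr (Or.inr hcn)) hcq
        have hfuel' : (rest ++ new).length + 2 * 1601 ≤ fuel + 2 * (v ++ new).length := by
          simp only [List.length_append]
          simp only [List.length_cons] at hfuel
          omega
        rw [hunf, ih (rest ++ new) (v ++ new) hqv' hqnd' hvnd' hsub' hcl' hfuel']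
        constructor
        · rintro ⟨c, hcq, hf⟩
          rcases List.mem_append.mp hcq with h1 | h1
          · exact ⟨c, List.mem_cons_of_mem _ h1, hf⟩
          · refine ⟨current, by simp, ?_⟩
            obtain ⟨_, hcns, hval⟩ := hprop c h1
            exact pvFrom_trans
              (pvFrom.step (pvFrom.refl current) (by simpa [pvNbrsB] using hcns) hval) hf
        · rintro ⟨c0, hc0q, hf⟩
          have hc0v : c0 ∈ v ++ new :=
            List.mem_append.mpr (Or.inl (hqv c0 hc0q))
          rcases pvFrom_escape hcl' hf hc0v with h1 | ⟨hgv, hgq⟩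
          · exact h1
          · exact absurd rfl (hcl' goal hgv hgq).1


theorem pvAddIf_spec (P : (Int × Int) → Prop) [DecidablePred P] :
    ∀ (l : List (Int × Int)) (s : PySem.Set (Int × Int)), s.Nodup →
    (l.foldl (fun F n => if P n then PySem.Set.add F n else F) s).Nodup ∧
    ∀ x, x ∈ l.foldl (fun F n => if P n then PySem.Set.add F n else F) s ↔
      x ∈ s ∨ (x ∈ l ∧ P x) := by
  intro l
  induction l with
  | nil => intro s hs; exact ⟨hs, by simp⟩
  | cons n l ih =>
    intro s hs
    rw [List.foldl_cons]
    by_cases h : P n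
    · rw [if_pos h]
      obtain ⟨h1, h2⟩ := ih (PySem.Set.add s n) (PySem.Set.nodup_add s n hs)
      refine ⟨h1, fun x => ?_⟩
      rw [h2 x, PySem.Set.mem_add]
      constructor
      · rintro ((hx | rfl) | ⟨hx, hp⟩)
        · exact Or.inl hx
        · exact Or.inr ⟨by simp, h⟩
        · exact Or.inr ⟨by simp [hx], hp⟩
      · rintro (hx | ⟨hx, hp⟩)
        · exact Or.inl (Or.inl hx)
        · rcases List.mem_cons.mp hx with rfl | hx2
          · exact Or.inl (Or.inr rfl)
          · exact Or.inr ⟨hx2, hp⟩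
    · rw [if_neg h]
      obtain ⟨h1, h2⟩ := ih s hs
      refine ⟨h1, fun x => ?_⟩
      rw [h2 x]
      constructor
      · rintro (hx | ⟨hx, hp⟩)
        · exact Or.inl hx
        · exact Or.inr ⟨by simp [hx], hp⟩
      · rintro (hx | ⟨hx, hp⟩)
        · exact Or.inl hx
        · rcases List.mem_cons.mp hx with rfl | hx2
          · exact absurd hp h
          · exact Or.inr ⟨hx2, hp⟩

theorem pvOuter_spec (grid : List (List String)) (fire_start : Int × Int)
    (R : PySem.Set (Int × Int)) :
    ∀ (L : List (Int × Int)) (s : PySem.Set (Int × Int)), s.Nodup →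
    (L.foldl (fun F c => (pvNbrsB c).foldl
        (fun F n => if ¬ PySem.Set.contains R n = true ∧ pvValidB grid fire_start n = true
                    then PySem.Set.add F n else F) F) s).Nodup ∧
    ∀ x, x ∈ L.foldl (fun F c => (pvNbrsB c).foldl
        (fun F n => if ¬ PySem.Set.contains R n = true ∧ pvValidB grid fire_start n = true
                    then PySem.Set.add F n else F) F) s ↔
      x ∈ s ∨ ((∃ c ∈ L, x ∈ pvNbrsB c) ∧ ¬ x ∈ R ∧ pvValidB grid fire_start x = true) := by
  have hconv : ∀ y : Int × Int, (¬ PySem.Set.contains R y = true) ↔ ¬ y ∈ R :=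
    fun y => not_congr (PySem.Set.contains_iff R y)
  intro L
  induction L with
  | nil => intro s hs; exact ⟨hs, by simp⟩
  | cons c L ih =>
    intro s hs
    rw [List.foldl_cons]
    obtain ⟨h1, h2⟩ := pvAddIf_spec
      (fun n => ¬ PySem.Set.contains R n = true ∧ pvValidB grid fire_start n = true)
      (pvNbrsB c) s hs
    obtain ⟨h3, h4⟩ := ih _ h1
    refine ⟨h3, fun x => ?_⟩
    rw [h4 x, h2 x]
    constructor
    · rintro ((hx | ⟨hm, hc, hv⟩) | ⟨⟨d, hd, hm⟩, hc, hv⟩)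
      · exact Or.inl hx
      · exact Or.inr ⟨⟨c, by simp, hm⟩, (hconv x).mp hc, hv⟩
      · exact Or.inr ⟨⟨d, by simp [hd], hm⟩, hc, hv⟩
    · rintro (hx | ⟨⟨d, hd, hm⟩, hc, hv⟩)
      · exact Or.inl (Or.inl hx)
      · rcases List.mem_cons.mp hd with rfl | hd2
        · exact Or.inl (Or.inr ⟨hm, (hconv x).mpr hc, hv⟩)
        · exact Or.inr ⟨⟨d, hd2, hm⟩, hc, hv⟩

theorem pvUnion_append : ∀ (t s : PySem.Set (Int × Int)), t.Nodup → (∀ x ∈ t, ¬ x ∈ s) →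
    PySem.Set.union s t = s ++ t := by
  intro t
  induction t with
  | nil =>
    intro s _ _
    rw [List.append_nil]
    simp [PySem.Set.union, PySem.Set.update]
  | cons a t ih =>
    intro s hnd hdisj
    calc PySem.Set.union s (a :: t)
        = t.foldl PySem.Set.add (s ++ [a]) := by
          show (a :: t).foldl PySem.Set.add s = _
          rw [List.foldl_cons, pvAdd_eq (hdisj a (by simp))]
      _ = PySem.Set.union (s ++ [a]) t := rfl
      _ = (s ++ [a]) ++ t := by
          refine ih (s ++ [a]) (List.nodup_cons.mp hnd).2 ?_
          intro x hx hmem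
          rcases List.mem_append.mp hmem with hxs | hxa
          · exact hdisj x (by simp [hx]) hxs
          · rw [List.mem_singleton] at hxa
            exact (List.nodup_cons.mp hnd).1 (hxa ▸ hx)
      _ = s ++ (a :: t) := by simp

theorem pvStepB_spec (grid : List (List String)) (fire_start : Int × Int)
    (R F : PySem.Set (Int × Int)) (_hR : R.Nodup) :
    ∃ F' : List (Int × Int),
      pvStepB grid fire_start (R, F) = (R ++ F', F') ∧ F'.Nodup ∧
      (∀ x ∈ F', ¬ x ∈ R ∧ pvValidB grid fire_start x = true ∧ ∃ c ∈ F, x ∈ pvNbrsB c) ∧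
      (∀ c ∈ F, ∀ n ∈ pvNbrsB c, pvValidB grid fire_start n = true → ¬ n ∈ R → n ∈ F') := by
  obtain ⟨h1, h2⟩ := pvOuter_spec grid fire_start R F PySem.Set.empty List.nodup_nil
  refine ⟨_, ?_, h1, ?_, ?_⟩
  · show (PySem.Set.union R _, _) = _
    rw [pvUnion_append _ R h1 (fun x hx => (((h2 x).mp hx).resolve_left (by simp [PySem.Set.empty])).2.1)]
  · intro x hx
    have h3 := ((h2 x).mp hx).resolve_left (by simp [PySem.Set.empty])
    exact ⟨h3.2.1, h3.2.2, h3.1⟩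
  · intro c hc n hn hval hnR
    exact (h2 n).mpr (Or.inr ⟨⟨c, hc, hn⟩, hnR, hval⟩)

theorem pvFoldRange_iterate {α : Type} (f : α → α) (s : α) :
    ∀ n : Nat, (List.range n).foldl (fun a _ => f a) s = f^[n] s := by
  intro n
  induction n with
  | zero => rfl
  | succ n ih =>
    rw [List.range_succ, List.foldl_append, ih, List.foldl_cons, List.foldl_nil,
      Function.iterate_succ_apply']

def pvRF (grid : List (List String)) (fire_start s0 : Int × Int) (k : Nat) :
    PySem.Set (Int × Int) × PySem.Set (Int × Int) :=
  (pvStepB grid fire_start)^[k] ([s0], [s0])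

def pvGood (grid : List (List String)) (fire_start s0 : Int × Int)
    (RF : PySem.Set (Int × Int) × PySem.Set (Int × Int)) : Prop :=
  RF.1.Nodup ∧ s0 ∈ RF.1 ∧ (∀ c ∈ RF.2, c ∈ RF.1) ∧
  (∀ c ∈ RF.1, pvFrom grid fire_start s0 c) ∧
  (∀ c ∈ RF.1, c = s0 ∨ c ∈ pvBoard) ∧
  (∀ c ∈ RF.1, ¬ c ∈ RF.2 → ∀ n ∈ pvNbrsB c, pvValidB grid fire_start n = true → n ∈ RF.1)

theorem pvRF_succ (grid : List (List String)) (fire_start s0 : Int × Int) (k : Nat) :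
    pvRF grid fire_start s0 (k + 1) = pvStepB grid fire_start (pvRF grid fire_start s0 k) := by
  exact Function.iterate_succ_apply' (pvStepB grid fire_start) k ([s0], [s0])

theorem pvGood_step {grid : List (List String)} {fire_start s0 : Int × Int}
    {RF : PySem.Set (Int × Int) × PySem.Set (Int × Int)} (h : pvGood grid fire_start s0 RF) :
    pvGood grid fire_start s0 (pvStepB grid fire_start RF) := by
  obtain ⟨R, F⟩ := RF
  obtain ⟨hnd, hs0, hFR, hreach, hboard, hcl⟩ := h
  obtain ⟨F', hstep, hnd', hprop, hcov⟩ := pvStepB_spec grid fire_start R F hnd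
  rw [hstep]
  refine ⟨?_, ?_, ?_, ?_, ?_, ?_⟩
  · rw [List.nodup_append]
    exact ⟨hnd, hnd', fun a ha b hb hab => (hprop b hb).1 (hab ▸ ha)⟩
  · exact List.mem_append.mpr (Or.inl hs0)
  · intro c hc
    exact List.mem_append.mpr (Or.inr hc)
  · intro c hc
    rcases List.mem_append.mp hc with h1 | h1
    · exact hreach c h1
    · obtain ⟨_, hval, d, hd, hm⟩ := hprop c h1
      exact pvFrom.step (hreach d (hFR d hd)) hm hval
  · intro c hc
    rcases List.mem_append.mp hc with h1 | h1
    · exact hboard c h1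
    · exact Or.inr (pvValid_mem_board (hprop c h1).2.1)
  · intro c hc hcF' n hn hval
    rcases List.mem_append.mp hc with h1 | h1
    · by_cases hcF : c ∈ F
      · by_cases hnR : n ∈ R
        · exact List.mem_append.mpr (Or.inl hnR)
        · exact List.mem_append.mpr (Or.inr (hcov c hcF n hn hval hnR))
      · exact List.mem_append.mpr (Or.inl (hcl c h1 hcF n hn hval))
    · exact absurd h1 hcF'

theorem pvGood_iterate (grid : List (List String)) (fire_start s0 : Int × Int) :
    ∀ k : Nat, pvGood grid fire_start s0 (pvRF grid fire_start s0 k) := by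
  intro k
  induction k with
  | zero =>
    refine ⟨List.nodup_singleton s0, by simp [pvRF], by simp [pvRF], ?_, ?_, ?_⟩
    · intro c hc
      simp only [pvRF, Function.iterate_zero, id] at hc
      rw [List.mem_singleton] at hc
      rw [hc]
      exact pvFrom.refl s0
    · intro c hc
      simp only [pvRF, Function.iterate_zero, id] at hc
      rw [List.mem_singleton] at hc
      exact Or.inl hc
    · intro c hc hcF
      simp only [pvRF, Function.iterate_zero, id] at hc hcF
      exact absurd hc hcF
  | succ k ih =>
    rw [pvRF_succ]
    exact pvGood_step ih

theorem pvLen_growth (grid : List (List String)) (fire_start s0 : Int × Int) (k : Nat) :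
    (pvRF grid fire_start s0 (k + 1)).1.length =
      (pvRF grid fire_start s0 k).1.length + (pvRF grid fire_start s0 (k + 1)).2.length := by
  have hnd := (pvGood_iterate grid fire_start s0 k).1
  obtain ⟨F', hstep, _, _, _⟩ := pvStepB_spec grid fire_start
    (pvRF grid fire_start s0 k).1 (pvRF grid fire_start s0 k).2 hnd
  have h1 : pvStepB grid fire_start (pvRF grid fire_start s0 k)
      = ((pvRF grid fire_start s0 k).1 ++ F', F') := hstep
  rw [pvRF_succ, h1]
  simp

theorem pvStepB_empty (grid : List (List String)) (fire_start : Int × Int)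
    (R : PySem.Set (Int × Int)) : pvStepB grid fire_start (R, []) = (R, []) := by
  rfl

theorem pvF_empty_stable (grid : List (List String)) (fire_start s0 : Int × Int) (k : Nat)
    (h : (pvRF grid fire_start s0 k).2 = []) :
    ∀ j : Nat, k ≤ j → pvRF grid fire_start s0 j = pvRF grid fire_start s0 k := by
  intro j hj
  induction j with
  | zero =>
    have hk0 : k = 0 := Nat.le_zero.mp hj
    rw [hk0]
  | succ j ihj =>
    by_cases hkj : k ≤ j
    · have hprev := ihj hkj
      have h2 : pvRF grid fire_start s0 k = ((pvRF grid fire_start s0 k).1, []) := by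
        rw [← h]
      rw [pvRF_succ, hprev, h2, pvStepB_empty]
    · have hk : k = j + 1 := by omega
      rw [hk]

theorem pvFinal_closed (grid : List (List String)) (fire_start s0 : Int × Int) :
    ∀ c ∈ (pvRF grid fire_start s0 1600).1, ∀ n ∈ pvNbrsB c,
      pvValidB grid fire_start n = true → n ∈ (pvRF grid fire_start s0 1600).1 := by
  intro c hc n hn hval
  by_cases hF : (pvRF grid fire_start s0 1600).2 = []
  · exact (pvGood_iterate grid fire_start s0 1600).2.2.2.2.2 c hc (by rw [hF]; simp) n hn hval
  · have hne : ∀ k, k ≤ 1600 → (pvRF grid fire_start s0 k).2 ≠ [] := by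
      intro k hk hempty
      exact hF (by rw [pvF_empty_stable grid fire_start s0 k hempty 1600 hk, hempty])
    have hlen : ∀ k, k ≤ 1600 → k + 1 ≤ (pvRF grid fire_start s0 k).1.length := by
      intro k
      induction k with
      | zero => intro _; simp [pvRF]
      | succ k ihk =>
        intro hk
        have h1 := pvLen_growth grid fire_start s0 k
        have h2 : 1 ≤ (pvRF grid fire_start s0 (k + 1)).2.length := by
          cases hcase : (pvRF grid fire_start s0 (k + 1)).2 with
          | nil => exact absurd hcase (hne (k + 1) hk)
          | cons a l => simp
        have h3 := ihk (by omega)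
        omega
    have h1600 := hlen 1600 (le_refl _)
    have good := pvGood_iterate grid fire_start s0 1600
    have hub := pvLen_le good.1 good.2.2.2.2.1
    have hsubF : (pvRF grid fire_start s0 1600).1.toFinset ⊆ insert s0 pvBoard := by
      intro x hx
      rcases good.2.2.2.2.1 x (List.mem_toFinset.mp hx) with h | h
      · exact Finset.mem_insert.mpr (Or.inl h)
      · exact Finset.mem_insert.mpr (Or.inr h)
    have hcard : (insert s0 pvBoard).card ≤ (pvRF grid fire_start s0 1600).1.toFinset.card := by
      rw [List.toFinset_card_of_nodup good.1]
      have hins := Finset.card_insert_le s0 pvBoard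
      rw [pvBoard_card] at hins
      omega
    have heq := Finset.eq_of_subset_of_card_le hsubF hcard
    have hmem : n ∈ insert s0 pvBoard := Finset.mem_insert.mpr (Or.inr (pvValid_mem_board hval))
    rw [← heq] at hmem
    exact List.mem_toFinset.mp hmem

theorem pvFrom_mem_final {grid : List (List String)} {fire_start s0 x : Int × Int}
    (h : pvFrom grid fire_start s0 x) : x ∈ (pvRF grid fire_start s0 1600).1 := by
  induction h with
  | refl => exact (pvGood_iterate grid fire_start s0 1600).2.1
  | @step dd nn h1 hm hval ih => exact pvFinal_closed grid fire_start s0 dd ih nn hm hval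

theorem pvAlt_iff (grid : List (List String)) (start goal fire_start : Int × Int) :
    is_success_possible_alt grid start goal fire_start = true ↔
      pvFrom grid fire_start start goal := by
  by_cases hg : goal = start
  · refine iff_of_true ?_ ?_
    · show (if goal = start then true else _) = true
      rw [if_pos hg]
    · rw [hg]
      exact pvFrom.refl start
  · rw [show is_success_possible_alt grid start goal fire_start =
        (if goal = start then true else PySem.Set.contains
          ((List.range (40 * 40)).foldl (fun RF _ => pvStepB grid fire_start RF)
            ([start], [start])).1 goal) from rfl]
    rw [if_neg hg, pvFoldRange_iterate (pvStepB grid fire_start) ([start], [start]) (40 * 40)]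
    rw [show (40 * 40 : Nat) = 1600 from rfl]
    rw [PySem.Set.contains_iff]
    constructor
    · intro hmem
      exact (pvGood_iterate grid fire_start start 1600).2.2.2.1 goal hmem
    · intro hreach
      exact pvFrom_mem_final hreach

theorem pvA_iff (grid : List (List String)) (start goal fire_start : Int × Int) :
    is_success_possible grid start goal fire_start = true ↔
      pvFrom grid fire_start start goal := by
  unfold is_success_possible
  have h := pvBfsA_iff grid fire_start goal start 4000 [start] [start]
    (fun c hc => hc) (List.nodup_singleton start) (List.nodup_singleton start)
    (by intro c hc; rw [List.mem_singleton] at hc; exact Or.inl hc)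
    (by intro c hc hcq; exact absurd hc hcq)
    (by simp)
  rw [show PySem.Set.ofList [start] = ([start] : List (Int × Int)) from rfl, h]
  constructor
  · rintro ⟨c, hc, hf⟩
    rw [List.mem_singleton] at hc
    exact hc ▸ hf
  · intro hf
    exact ⟨start, by simp, hf⟩

-- ===== VERDICT (by name: the statement is the Claim_ definition above) =====
theorem is_success_possible_spec : Claim_equal_is_success_possible := by
  intro grid start goal fire_start _hdom _hpre
  unfold Spec_is_success_possible
  have hA := pvA_iff grid start goal fire_start
  have hB := pvAlt_iff grid start goal fire_start
  by_cases hp : pvFrom grid fire_start start goal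
  · rw [hA.mpr hp, hB.mpr hp]
  · have h1 : is_success_possible grid start goal fire_start = false := by
      cases h : is_success_possible grid start goal fire_start
      · rfl
      · exact absurd (hA.mp h) hp
    have h2 : is_success_possible_alt grid start goal fire_start = false := by
      cases h : is_success_possible_alt grid start goal fire_start
      · rfl
      · exact absurd (hB.mp h) hp
    rw [h1, h2]
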